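-- pv_equiv track=rewrite | github.com/WSIZ-Bielsko/ASD-2026 | asd_2026/graphs/trains/graph_it.py | to_graph
-- ===== SOURCE A (Python) =====
-- from collections import defaultdict
--
-- OFFSET = 1000
--
-- def to_graph(upper: list[int], lower: list[int]) -> dict[int, list[int]]:
--     d = defaultdict(lambda: [])
--     prev = None
--     n = len(upper)
--     for i in range(n):
--         if upper[i] == 1:
--             if prev is not None:
--                 d[prev].append(i)
--             prev = i
--         if upper[i] == 1 and lower[i] == 1:
--             d[i].append(OFFSET + i)
--             d[OFFSET + i].append(i)
--
--     prev = None
--     for i in range(n - 1, -1, -1):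
--         if lower[i] == 1:
--             if prev is not None:
--                 d[OFFSET+prev].append(OFFSET+i)
--             prev = i
--     return d
-- ===== SOURCE B (Python) =====
-- OFFSET = 1000
--
-- def to_graph(upper: list[int], lower: list[int]) -> dict[int, list[int]]:
--     # Closed-form construction: each node's final adjacency list is computed
--     # directly from its nearest marked neighbours (next upper-1 to the right,
--     # previous lower-1 to the left); no incremental edge appends.
--     n = len(upper)
--
--     def nxt_u(i):          # next index > i with upper == 1, else -1
--         for j in range(i + 1, n):
--             if upper[j] == 1:
--                 return j
--         return -1
--
--     def prv_l(i):          # last index < i with lower == 1, else -1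
--         for j in range(i - 1, -1, -1):
--             if lower[j] == 1:
--                 return j
--         return -1
--
--     d = {}
--     for i in range(n):
--         if upper[i] == 1:
--             both = lower[i] == 1
--             nu = nxt_u(i)
--             if both or nu != -1:
--                 d[i] = ([OFFSET + i] if both else []) + ([nu] if nu != -1 else [])
--             if both:
--                 p = prv_l(i)
--                 d[OFFSET + i] = [i] + ([OFFSET + p] if p != -1 else [])
--     for i in range(n - 1, -1, -1):
--         if lower[i] == 1 and upper[i] != 1:
--             p = prv_l(i)
--             if p != -1:
--                 d[OFFSET + i] = [OFFSET + p]
--     return d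
-- ===== Notes on version B (the rewrite author's own statement) =====
-- stated objective: alternative
-- what changed: B builds each node's final adjacency list in closed form from its nearest marked neighbours (next upper-1 to the right via nxt_u, previous lower-1 to the left via prv_l) and assigns every dict entry exactly once, instead of A's two stateful scans that thread a prev pointer and grow the defaultdict by incremental appends.
-- outside the precondition, e.g. on to_graph([1], []): A raises IndexError, B raises IndexError
import Mathlib
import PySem

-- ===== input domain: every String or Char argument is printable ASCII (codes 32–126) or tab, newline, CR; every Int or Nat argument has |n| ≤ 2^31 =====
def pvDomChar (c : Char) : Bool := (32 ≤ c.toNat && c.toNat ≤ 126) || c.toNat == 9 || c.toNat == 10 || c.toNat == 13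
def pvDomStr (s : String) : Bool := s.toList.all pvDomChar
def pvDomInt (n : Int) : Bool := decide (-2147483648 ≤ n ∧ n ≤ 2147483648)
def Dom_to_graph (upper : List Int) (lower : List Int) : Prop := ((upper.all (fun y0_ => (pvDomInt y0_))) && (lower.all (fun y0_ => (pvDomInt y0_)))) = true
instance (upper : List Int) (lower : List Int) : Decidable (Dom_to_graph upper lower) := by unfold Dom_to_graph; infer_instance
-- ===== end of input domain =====

-- B replaces A's stateful dict-mutating double scan by a closed-form construction: each
-- node's final adjacency list is computed directly from its nearest marked neighbours
-- (objective: alternative); equivalence is about the returned dict (A mutates nothing).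

-- shared helper: d[k].append(v) on a defaultdict(list)
def pyApp (d : PySem.Dict Int (List Int)) (k v : Int) : PySem.Dict Int (List Int) :=
  d.modify k [] (· ++ [v])

-- xs[i]; every access is in range under Pre_to_graph, so the default 0 is never read
def getI (xs : List Int) (i : Int) : Int := (PySem.List.pyGet? xs i).getD 0

-- ===== PORT A =====
def stepA1 (upper lower : List Int) (st : PySem.Dict Int (List Int) × Option Int) (i : Int) :
    PySem.Dict Int (List Int) × Option Int :=
  let st1 := if getI upper i == 1 then
      ((match st.2 with | some p => pyApp st.1 p i | none => st.1), some i)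
    else st
  if getI upper i == 1 && getI lower i == 1 then
    (pyApp (pyApp st1.1 i (1000 + i)) (1000 + i) i, st1.2)
  else st1

def stepA2 (lower : List Int) (st : PySem.Dict Int (List Int) × Option Int) (i : Int) :
    PySem.Dict Int (List Int) × Option Int :=
  if getI lower i == 1 then
    ((match st.2 with | some p => pyApp st.1 (1000 + p) (1000 + i) | none => st.1), some i)
  else st

def to_graph (upper : List Int) (lower : List Int) : List (Int × List Int) :=
  let n : Int := upper.length
  let st1 := (PySem.List.pyRange 0 n 1).foldl (stepA1 upper lower) (PySem.Dict.empty, none)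
  let st2 := (PySem.List.pyRange (n - 1) (-1) (-1)).foldl (stepA2 lower) (st1.1, none)
  st2.1.items

-- ===== PORT B =====
-- nxt_u(i) of Source B: first j > i with upper[j] == 1, else -1 (scan with early return = find?)
def nxtU (upper : List Int) (n i : Int) : Int :=
  ((PySem.List.pyRange (i + 1) n 1).find? (fun j => getI upper j == 1)).getD (-1)

-- prv_l(i) of Source B: last j < i with lower[j] == 1, else -1
def prvL (lower : List Int) (i : Int) : Int :=
  ((PySem.List.pyRange (i - 1) (-1) (-1)).find? (fun j => getI lower j == 1)).getD (-1)

def stepB1 (upper lower : List Int) (n : Int) (d : PySem.Dict Int (List Int)) (i : Int) :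
    PySem.Dict Int (List Int) :=
  if getI upper i == 1 then
    let both := getI lower i == 1
    let nu := nxtU upper n i
    let d1 := if both || !(nu == -1) then
        d.insert i ((if both then [1000 + i] else []) ++ (if nu == -1 then [] else [nu]))
      else d
    if both then
      let p := prvL lower i
      d1.insert (1000 + i) ([i] ++ (if p == -1 then [] else [1000 + p]))
    else d1
  else d

def stepB2 (upper lower : List Int) (d : PySem.Dict Int (List Int)) (i : Int) :
    PySem.Dict Int (List Int) :=
  if getI lower i == 1 && !(getI upper i == 1) then
    let p := prvL lower i
    if !(p == -1) then d.insert (1000 + i) [1000 + p] else d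
  else d

def to_graph_alt (upper : List Int) (lower : List Int) : List (Int × List Int) :=
  let n : Int := upper.length
  let d1 := (PySem.List.pyRange 0 n 1).foldl (stepB1 upper lower n) PySem.Dict.empty
  let d2 := (PySem.List.pyRange (n - 1) (-1) (-1)).foldl (stepB2 upper lower) d1
  d2.items

-- ===== PRECONDITION & SPEC =====
-- Pre_ excludes (a) inputs where a nonempty upper is longer than lower, on which A raises
-- IndexError (B raises there too), and (b) inputs with more than OFFSET = 1000 positions,
-- on which the OFFSET-based node numbering collides (plain node i and lower node
-- OFFSET+(i-1000) become the same dict key) and A's merged adjacency lists are an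
-- accident of the encoding, not a graph anyone specified.
def Pre_to_graph (upper : List Int) (lower : List Int) : Prop :=
  (upper.length ≤ lower.length ∨ upper = []) ∧ upper.length ≤ 1000
instance (upper : List Int) (lower : List Int) : Decidable (Pre_to_graph upper lower) := by
  unfold Pre_to_graph; infer_instance

def pvWitness_to_graph : List Int × List Int := ([1, 0, 1], [1, 1, 0])

def Spec_to_graph (upper : List Int) (lower : List Int) (out : List (Int × List Int)) : Prop := out = to_graph_alt upper lower
instance (upper : List Int) (lower : List Int) (out : List (Int × List Int)) : Decidable (Spec_to_graph upper lower out) := by unfold Spec_to_graph; infer_instance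

-- ===== CLAIM (what is proved, stated in full; the proofs are below) =====
def Claim_equal_to_graph : Prop := ∀ (upper : List Int) (lower : List Int), Dom_to_graph upper lower → Pre_to_graph upper lower → Spec_to_graph upper lower (to_graph upper lower)

-- ===== LEMMAS AND PROOFS =====

-- ---------- generic list lemmas ----------

-- a fold whose step is the identity off p is a fold over the filtered list
theorem foldl_filter_of_step {α σ : Type} (p : α → Bool) (f g : σ → α → σ)
    (hfg : ∀ s x, f s x = if p x then g s x else s) :
    ∀ (xs : List α) (s : σ), xs.foldl f s = (xs.filter p).foldl g s := by
  intro xs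
  induction xs with
  | nil => intro s; rfl
  | cons x t ih =>
    intro s
    by_cases hx : p x = true
    · simp [hx, hfg, ih]
    · simp at hx
      simp [hx, hfg, ih]

theorem find?_eq_head?_filter {α : Type} (p : α → Bool) :
    ∀ l : List α, l.find? p = (l.filter p).head? := by
  intro l
  induction l with
  | nil => rfl
  | cons x t ih =>
    by_cases h : p x
    · rw [List.find?_cons_of_pos h, List.filter_cons, if_pos h]
      rfl
    · rw [List.find?_cons_of_neg h, List.filter_cons, if_neg (by simp [h]), ih]

theorem flatMap_if_singleton {α β : Type} (c : α → Bool) (g : α → β) :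
    ∀ l : List α, (l.flatMap (fun a => if c a then [g a] else [])) = (l.filter c).map g := by
  intro l
  induction l with
  | nil => rfl
  | cons x t ih =>
    by_cases h : c x <;> simp [List.filter_cons, h, ih]

theorem filter_and {α : Type} (p q : α → Bool) :
    ∀ l : List α, l.filter (fun a => p a && q a) = (l.filter p).filter q := by
  intro l
  induction l with
  | nil => rfl
  | cons x t ih =>
    by_cases hp : p x <;> by_cases hq : q x <;>
      simp [List.filter_cons, hp, hq, ih]

theorem split_pred {α : Type} (Q : α → Bool) :
    ∀ (X X' Y Y' : List α), X ++ Y = X' ++ Y' →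
      (∀ x ∈ X, Q x = true) → (∀ y ∈ Y, Q y = false) →
      (∀ x ∈ X', Q x = true) → (∀ y ∈ Y', Q y = false) → X = X' ∧ Y = Y' := by
  intro X
  induction X with
  | nil =>
    intro X' Y Y' h _ hY hX' _
    cases X' with
    | nil => simpa using h
    | cons x' t' =>
      exfalso
      have hY2 : Y = x' :: (t' ++ Y') := by simpa using h
      have hx' : x' ∈ Y := by rw [hY2]; simp
      have h1 := hY x' hx'
      have h2 := hX' x' (by simp)
      rw [h1] at h2
      exact Bool.false_ne_true h2
  | cons x t ih =>
    intro X' Y Y' h hX hY hX' hY'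
    cases X' with
    | nil =>
      exfalso
      have hY2 : Y' = x :: (t ++ Y) := by simpa using h.symm
      have hx : x ∈ Y' := by rw [hY2]; simp
      have h1 := hY' x hx
      have h2 := hX x (by simp)
      rw [h1] at h2
      exact Bool.false_ne_true h2
    | cons x' t' =>
      simp only [List.cons_append, List.cons.injEq] at h
      obtain ⟨rfl, h2⟩ := h
      have := ih t' Y Y' h2 (fun a ha => hX a (by simp [ha])) hY
        (fun a ha => hX' a (by simp [ha])) hY'
      exact ⟨by simp [this.1], this.2⟩

theorem zip_tail_of_adj {α : Type} (pv : α → α) :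
    ∀ T : List α, (∀ (P : List α) (x y : α) (S : List α), T = P ++ x :: y :: S → pv x = y) →
      T.zip T.tail = T.dropLast.map (fun b => (b, pv b)) := by
  intro T
  induction T with
  | nil => intro _; rfl
  | cons x t ih =>
    intro h
    cases t with
    | nil => rfl
    | cons y t' =>
      have hxy : pv x = y := h [] x y t' rfl
      have ht := ih (fun P a b S hS => h (x :: P) a b S (by rw [hS]; rfl))
      simp only [List.zip_cons_cons, List.tail_cons, List.dropLast_cons₂, List.map_cons] at ht ⊢
      rw [ht, hxy]

theorem map_update_not_mem (k : Int) (v : List Int) :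
    ∀ l : List (Int × List Int), k ∉ l.map Prod.fst →
      (l.map (fun p => if p.1 == k then (k, v) else p)) = l := by
  intro l
  induction l with
  | nil => intro _; rfl
  | cons q t ih =>
    intro h
    simp only [List.map_cons, List.mem_cons] at h
    have h1 : ¬ (k = q.1 ∨ k ∈ t.map Prod.fst) := h
    have hq : (q.1 == k) = false := by
      simp only [beq_eq_false_iff_ne, ne_eq]
      intro he
      exact h1 (Or.inl he.symm)
    have h2 : k ∉ t.map Prod.fst := fun hm => h1 (Or.inr hm)
    simp only [List.map_cons, hq, Bool.false_eq_true, if_false, ih h2]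

theorem map_fst_update (k : Int) (v : List Int) (l : List (Int × List Int)) :
    (l.map (fun p => if p.1 == k then (k, v) else p)).map Prod.fst = l.map Prod.fst := by
  rw [List.map_map]
  apply List.map_congr_left
  intro q _
  show ((if q.1 == k then (k, v) else q)).1 = q.1
  by_cases h : q.1 = k
  · simp [h]
  · simp [h]

theorem filter_beq_of_nodup (a : Int) :
    ∀ l : List Int, l.Nodup → l.filter (fun x => x == a) = if a ∈ l then [a] else [] := by
  intro l
  induction l with
  | nil => intro _; rfl
  | cons x t ih =>
    intro h
    rw [List.nodup_cons] at h
    rw [List.filter_cons]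
    by_cases hx : x = a
    · subst hx
      have hxt : x ∉ t := h.1
      simp [ih h.2, hxt]
    · have hb : (x == a) = false := by simp [hx]
      have hmem : (a ∈ x :: t) = (a ∈ t) := by
        simp [List.mem_cons, Ne.symm hx]
      simp [hb, ih h.2, hmem, Ne.symm hx]

-- ---------- PySem.Dict items bookkeeping ----------

theorem keys_eq_map_fst (d : PySem.Dict Int (List Int)) : d.keys = d.items.map Prod.fst := rfl

theorem empty_items : (PySem.Dict.empty : PySem.Dict Int (List Int)).items = [] := rfl

theorem contains_iff_fst (d : PySem.Dict Int (List Int)) (k : Int) :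
    d.contains k = true ↔ k ∈ d.items.map Prod.fst := by
  rw [PySem.Dict.contains_eq_decide_mem_keys, keys_eq_map_fst]
  simp

theorem mk_items (l : List (Int × List Int)) : (PySem.Dict.mk l).items = l := rfl

theorem mk_items_self (d : PySem.Dict Int (List Int)) : PySem.Dict.mk d.items = d := by
  apply PySem.Dict.ext; rfl

theorem items_pyApp_fresh (d : PySem.Dict Int (List Int)) (k v : Int)
    (h : k ∉ d.items.map Prod.fst) : (pyApp d k v).items = d.items ++ [(k, [v])] := by
  have hcf : d.contains k = false := by
    cases hc : d.contains k
    · rfl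
    · exact absurd ((contains_iff_fst d k).mp hc) h
  have hg : d.getD k [] = [] := PySem.Dict.getD_of_not_contains d [] hcf
  have hmod : pyApp d k v = d.insert k (d.getD k [] ++ [v]) := rfl
  rw [hmod, hg]
  simp [PySem.Dict.items_insert_of_not_contains, hcf]

theorem items_pyApp_found (d : PySem.Dict Int (List Int)) (k v : Int) (w : List Int)
    (hmem : (k, w) ∈ d.items) (hnd : (d.items.map Prod.fst).Nodup) :
    (pyApp d k v).items = d.items.map (fun p => if p.1 == k then (k, w ++ [v]) else p) := by
  have hc : d.contains k = true := (contains_iff_fst d k).mpr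
    (List.mem_map.mpr ⟨(k, w), hmem, rfl⟩)
  have hg : d.getD k [] = w := PySem.Dict.getD_of_mem_items d hmem hnd []
  have hmod : pyApp d k v = d.insert k (d.getD k [] ++ [v]) := rfl
  rw [hmod, hg]
  simp [PySem.Dict.items_insert_of_contains, hc]

-- fold of inserts over FRESH distinct pair keys appends the pairs
theorem fold_insert_pairs :
    ∀ (ps : List (Int × List Int)) (d : PySem.Dict Int (List Int)),
      ((d.items.map Prod.fst) ++ ps.map Prod.fst).Nodup →
      (ps.foldl (fun d p => d.insert p.1 p.2) d).items = d.items ++ ps := by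
  intro ps
  induction ps with
  | nil => intro d _; simp
  | cons p t ih =>
    intro d hnd
    have hdisj := (List.nodup_append.mp hnd).2.2
    have hfresh : p.1 ∉ d.items.map Prod.fst := fun hm => hdisj p.1 hm p.1 (by simp) rfl
    have hcf : d.contains p.1 = false := by
      cases hc : d.contains p.1
      · rfl
      · exact absurd ((contains_iff_fst d p.1).mp hc) hfresh
    have hitems : (d.insert p.1 p.2).items = d.items ++ [p] := by
      have := PySem.Dict.items_insert_of_not_contains (d := d) (k := p.1) (v := p.2) hcf
      simpa using this
    have hnd' : (((d.insert p.1 p.2).items.map Prod.fst) ++ t.map Prod.fst).Nodup := by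
      rw [hitems]
      simp only [List.map_append, List.map_cons, List.map_nil] at hnd ⊢
      simpa [List.append_assoc] using hnd
    simp only [List.foldl_cons]
    rw [ih _ hnd', hitems]
    simp

-- fold over a list of (conditional) insert blocks with globally distinct fresh keys
theorem items_foldl_inserts {α : Type} (es : α → List (Int × List Int)) :
    ∀ (xs : List α) (d : PySem.Dict Int (List Int)),
      ((d.items.map Prod.fst) ++ (xs.flatMap (fun x => (es x).map Prod.fst))).Nodup →
      (xs.foldl (fun d x => (es x).foldl (fun d p => d.insert p.1 p.2) d) d).items
        = d.items ++ xs.flatMap es := by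
  intro xs
  induction xs with
  | nil => intro d _; simp
  | cons x t ih =>
    intro d hnd
    have h1 : (((es x).foldl (fun d p => d.insert p.1 p.2) d).items) = d.items ++ es x := by
      apply fold_insert_pairs
      have hsub2 : ((d.items.map Prod.fst) ++ ((es x).map Prod.fst)).Sublist
          ((d.items.map Prod.fst) ++ (((es x).map Prod.fst) ++ t.flatMap fun x => (es x).map Prod.fst)) :=
        (List.Sublist.refl _).append (List.sublist_append_left _ _)
      exact hsub2.nodup (by simpa [List.flatMap_cons, List.append_assoc] using hnd)
    simp only [List.foldl_cons]
    rw [ih _ (by rw [h1]; simpa [List.flatMap_cons, List.append_assoc] using hnd), h1]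
    simp [List.flatMap_cons]

-- fold of '.append(v)' events over distinct keys: existing keys get their suffix in
-- place, unseen keys are created in event order at the end
theorem foldl_pyApp_items :
    ∀ (es : List (Int × Int)) (d : PySem.Dict Int (List Int)),
      (d.items.map Prod.fst).Nodup → (es.map Prod.fst).Nodup →
      (es.foldl (fun d p => pyApp d p.1 p.2) d).items
        = d.items.map (fun q => (q.1, q.2 ++ ((es.filter (fun p => p.1 == q.1)).map Prod.snd)))
          ++ ((es.filter (fun p => !(d.contains p.1))).map (fun p => (p.1, [p.2]))) := by
  intro es
  induction es with
  | nil =>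
    intro d _ _
    simp
  | cons p t ih =>
    intro d hd ht
    simp only [List.map_cons, List.nodup_cons] at ht
    simp only [List.foldl_cons]
    by_cases hc : d.contains p.1 = true
    · -- existing key: in-place update
      obtain ⟨q0, hq0, hq0f⟩ := List.mem_map.mp ((contains_iff_fst d p.1).mp hc)
      have hq0' : (p.1, q0.2) ∈ d.items := by
        have hqe : q0 = (p.1, q0.2) := by rw [← hq0f]
        rwa [← hqe]
      have hstep : (pyApp d p.1 p.2).items
          = d.items.map (fun q => if q.1 == p.1 then (p.1, q0.2 ++ [p.2]) else q) :=
        items_pyApp_found d p.1 p.2 q0.2 hq0' hd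
      have hfst : ((pyApp d p.1 p.2).items.map Prod.fst) = d.items.map Prod.fst := by
        rw [hstep]; exact map_fst_update _ _ _
      have hcont : ∀ x, (pyApp d p.1 p.2).contains x = d.contains x := by
        intro x
        rw [PySem.Dict.contains_eq_decide_mem_keys, PySem.Dict.contains_eq_decide_mem_keys,
          keys_eq_map_fst, keys_eq_map_fst, hfst]
      rw [ih _ (by rw [hfst]; exact hd) ht.2, hstep]
      congr 1
      · rw [List.map_map]
        apply List.map_congr_left
        intro q hq
        by_cases hqp : q.1 = p.1
        · have hb : (q.1 == p.1) = true := by simp [hqp]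
          have hqv : q.2 = q0.2 := by
            have h1 : (p.1, q.2) ∈ d.items := by
              have hqe : q = (p.1, q.2) := by rw [← hqp]
              rwa [← hqe]
            have e1 := PySem.Dict.getD_of_mem_items d h1 hd []
            have e2 := PySem.Dict.getD_of_mem_items d hq0' hd []
            exact e1.symm.trans e2
          have hb' : (p.1 == q.1) = true := by simp [hqp]
          simp only [Function.comp_apply, hb, if_true, List.filter_cons, hb', List.map_cons]
          simp [hqp, hqv]
        · have hb : (q.1 == p.1) = false := by simp [hqp]
          have hb' : (p.1 == q.1) = false := by simp [Ne.symm hqp]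
          simp only [Function.comp_apply, hb, Bool.false_eq_true, if_false, List.filter_cons, hb']
      · have hfc : t.filter (fun x => !((pyApp d p.1 p.2).contains x.1))
            = t.filter (fun x => !(d.contains x.1)) := by
          apply List.filter_congr
          intro x _; rw [hcont]
        rw [hfc, List.filter_cons]
        simp [hc]
    · -- fresh key: appended at the end, never touched again (its key is not in t)
      have hcf : d.contains p.1 = false := by
        cases hcc : d.contains p.1
        · rfl
        · exact absurd hcc hc
      have hfresh : p.1 ∉ d.items.map Prod.fst := fun hm => hc ((contains_iff_fst d p.1).mpr hm)
      have hstep : (pyApp d p.1 p.2).items = d.items ++ [(p.1, [p.2])] :=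
        items_pyApp_fresh d p.1 p.2 hfresh
      have hfst : ((pyApp d p.1 p.2).items.map Prod.fst) = d.items.map Prod.fst ++ [p.1] := by
        rw [hstep]; simp
      have hnd' : ((pyApp d p.1 p.2).items.map Prod.fst).Nodup := by
        rw [hfst, List.nodup_append]
        refine ⟨hd, List.nodup_singleton _, ?_⟩
        intro a ha b hb
        simp only [List.mem_singleton] at hb
        subst hb
        intro he
        exact hfresh (he ▸ ha)
      have hcont : ∀ x, x ≠ p.1 → (pyApp d p.1 p.2).contains x = d.contains x := by
        intro x hx
        rw [PySem.Dict.contains_eq_decide_mem_keys, PySem.Dict.contains_eq_decide_mem_keys,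
          keys_eq_map_fst, keys_eq_map_fst, hfst]
        simp [hx]
      rw [ih _ hnd' ht.2, hstep]
      have h2 : (t.filter (fun x => !((pyApp d p.1 p.2).contains x.1)))
          = t.filter (fun x => !(d.contains x.1)) := by
        apply List.filter_congr
        intro x hx
        have : x.1 ≠ p.1 := by
          intro he
          exact ht.1 (List.mem_map.mpr ⟨x, hx, he⟩)
        rw [hcont x.1 this]
      rw [h2, List.map_append]
      have hp1 : ∀ q ∈ d.items, (fun q => (q.1, q.2 ++ ((t.filter (fun p' => p'.1 == q.1)).map Prod.snd))) q
          = (fun q => (q.1, q.2 ++ (((p :: t).filter (fun p' => p'.1 == q.1)).map Prod.snd))) q := by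
        intro q hq
        have hne : (p.1 == q.1) = false := by
          have : q.1 ≠ p.1 := by
            intro he; rw [← he] at hfresh
            exact hfresh (List.mem_map.mpr ⟨q, hq, rfl⟩)
          simp [Ne.symm this]
        simp [List.filter_cons, hne]
      have hnew : t.filter (fun p' => p'.1 == p.1) = [] := by
        rw [List.filter_eq_nil_iff]
        intro a ha
        have : a.1 ≠ p.1 := fun he => ht.1 (List.mem_map.mpr ⟨a, ha, he⟩)
        simp [this]
      rw [List.map_congr_left hp1]
      rw [show (p :: t).filter (fun x => !(d.contains x.1)) = p :: t.filter (fun x => !(d.contains x.1)) by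
        rw [List.filter_cons, if_pos (by simp [hcf])]]
      simp [hnew, List.append_assoc]

-- ---------- A's loops as chain folds (previous-pointer elimination) ----------

def crossB (lower : List Int) (d : PySem.Dict Int (List Int)) (u : Int) : PySem.Dict Int (List Int) :=
  if getI lower u == 1 then pyApp (pyApp d u (1000 + u)) (1000 + u) u else d

def stepU (lower : List Int) (st : PySem.Dict Int (List Int) × Option Int) (i : Int) :
    PySem.Dict Int (List Int) × Option Int :=
  (crossB lower (match st.2 with | some p => pyApp st.1 p i | none => st.1) i, some i)

theorem stepA1_eq (upper lower : List Int) (st : PySem.Dict Int (List Int) × Option Int) (i : Int) :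
    stepA1 upper lower st i = if getI upper i == 1 then stepU lower st i else st := by
  unfold stepA1 stepU crossB
  by_cases hu : getI upper i == 1 <;> by_cases hl : getI lower i == 1 <;> simp [hu, hl]

theorem chain_zip_U (lower : List Int) :
    ∀ (xs : List Int) (d : PySem.Dict Int (List Int)) (p : Int),
      (xs.foldl (stepU lower) (d, some p)).1 =
        ((p :: xs).zip xs).foldl (fun d pu => crossB lower (pyApp d pu.1 pu.2) pu.2) d := by
  intro xs
  induction xs with
  | nil => intro d p; rfl
  | cons x t ih =>
    intro d p
    show (t.foldl (stepU lower) (stepU lower (d, p) x)).1 = _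
    simp only [stepU, List.zip_cons_cons, List.foldl_cons]
    exact ih _ x

def stepV (st : PySem.Dict Int (List Int) × Option Int) (i : Int) :
    PySem.Dict Int (List Int) × Option Int :=
  ((match st.2 with | some p => pyApp st.1 (1000 + p) (1000 + i) | none => st.1), some i)

theorem stepA2_eq (lower : List Int) (st : PySem.Dict Int (List Int) × Option Int) (i : Int) :
    stepA2 lower st i = if getI lower i == 1 then stepV st i else st := rfl

theorem chain_zip_V :
    ∀ (ys : List Int) (d : PySem.Dict Int (List Int)) (p : Int),
      (ys.foldl stepV (d, some p)).1 =
        ((p :: ys).zip ys).foldl (fun d ab => pyApp d (1000 + ab.1) (1000 + ab.2)) d := by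
  intro ys
  induction ys with
  | nil => intro d p; rfl
  | cons x t ih =>
    intro d p
    show (t.foldl stepV (stepV (d, p) x)).1 = _
    simp only [stepV, List.zip_cons_cons, List.foldl_cons]
    exact ih _ x

-- A's forward chain, with the leading cross block made explicit
def chainFoldU (lower : List Int) (d : PySem.Dict Int (List Int)) :
    List Int → PySem.Dict Int (List Int)
  | [] => d
  | u0 :: t =>
      ((u0 :: t).zip t).foldl (fun d pu => crossB lower (pyApp d pu.1 pu.2) pu.2)
        (crossB lower d u0)

theorem foldU_none (lower : List Int) (us : List Int) (d : PySem.Dict Int (List Int)) :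
    (us.foldl (stepU lower) (d, none)).1 = chainFoldU lower d us := by
  cases us with
  | nil => rfl
  | cons u t =>
    show (t.foldl (stepU lower) (stepU lower (d, none) u)).1 = _
    simp only [stepU]
    exact chain_zip_U lower t (crossB lower d u) u

theorem foldV_none (ys : List Int) (d : PySem.Dict Int (List Int)) :
    (ys.foldl stepV (d, none)).1 =
      (ys.zip ys.tail).foldl (fun d ab => pyApp d (1000 + ab.1) (1000 + ab.2)) d := by
  cases ys with
  | nil => rfl
  | cons y t =>
    show (t.foldl stepV (stepV (d, none) y)).1 = _
    simp only [stepV]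
    exact chain_zip_V t d y

-- ---------- the forward pass, characterised ----------

-- the two cross entries of a both-marked position
def cb2L (lower : List Int) (a : Int) : List (Int × List Int) :=
  if getI lower a == 1 then [(a, [1000 + a]), (1000 + a, [a])] else []

-- items of the dict after A's forward pass over the marked positions a :: t
def gU (lower : List Int) : List Int → List (Int × List Int)
  | [] => []
  | [a] => cb2L lower a
  | a :: b :: t =>
      (if getI lower a == 1 then [(a, [1000 + a, b]), (1000 + a, [a])] else [(a, [b])])
        ++ gU lower (b :: t)

theorem cb2L_fst_sub (lower : List Int) (a : Int) :
    ((cb2L lower a).map Prod.fst).Sublist [a, 1000 + a] := by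
  unfold cb2L
  by_cases hl : getI lower a == 1
  · rw [if_pos hl]
    simp only [List.map_cons, List.map_nil]
    exact List.Sublist.refl _
  · rw [if_neg hl]
    exact List.nil_sublist _

theorem crossB_items (lower : List Int) (d : PySem.Dict Int (List Int)) (a : Int)
    (ha : a ∉ d.items.map Prod.fst) (ha' : (1000 + a) ∉ d.items.map Prod.fst)
    (hne : a ≠ 1000 + a) :
    (crossB lower d a).items = d.items ++ cb2L lower a := by
  unfold crossB cb2L
  by_cases hl : getI lower a == 1
  · simp only [hl, if_true]
    rw [items_pyApp_fresh _ _ _ (by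
        rw [items_pyApp_fresh d a (1000 + a) ha]
        simp [ha', Ne.symm hne])]
    · simp [items_pyApp_fresh d a (1000 + a) ha]
  · simp [hl]

theorem chainA_items (lower : List Int) :
    ∀ (t : List Int) (a : Int) (d0 : List (Int × List Int)),
      ((d0.map Prod.fst) ++ ((a :: t).flatMap (fun x => [x, 1000 + x]))).Nodup →
      (∀ x ∈ a :: t, 0 ≤ x ∧ x < 1000) →
      (((a :: t).zip t).foldl (fun d pu => crossB lower (pyApp d pu.1 pu.2) pu.2)
          (PySem.Dict.mk (d0 ++ cb2L lower a))).items
        = d0 ++ gU lower (a :: t) := by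
  intro t
  induction t with
  | nil =>
    intro a d0 _ _
    simp [gU, mk_items]
  | cons b t' ih =>
    intro a d0 hnd hb
    have hba := hb a (by simp)
    have hbb := hb b (by simp)
    have hdisj := (List.nodup_append.mp hnd).2.2
    have hndK : ((a :: b :: t').flatMap (fun x => [x, 1000 + x])).Nodup :=
      (List.nodup_append.mp hnd).2.1
    have hnd0 : (d0.map Prod.fst).Nodup := (List.nodup_append.mp hnd).1
    have haD : a ∉ d0.map Prod.fst := fun hm =>
      hdisj a hm a (by simp [List.flatMap_cons]) rfl
    have haD' : (1000 + a) ∉ d0.map Prod.fst := fun hm =>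
      hdisj (1000 + a) hm (1000 + a) (by simp [List.flatMap_cons]) rfl
    have hbD : b ∉ d0.map Prod.fst := fun hm =>
      hdisj b hm b (by simp [List.flatMap_cons]) rfl
    have hbD' : (1000 + b) ∉ d0.map Prod.fst := fun hm =>
      hdisj (1000 + b) hm (1000 + b) (by simp [List.flatMap_cons]) rfl
    have hndK' : (a :: (1000 + a) :: b :: (1000 + b) :: (t'.flatMap (fun x => [x, 1000 + x]))).Nodup := by
      simpa [List.flatMap_cons] using hndK
    obtain ⟨ha1, hndK'⟩ := List.nodup_cons.mp hndK'
    obtain ⟨hOa1, hndK'⟩ := List.nodup_cons.mp hndK'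
    obtain ⟨hb1, hndK'⟩ := List.nodup_cons.mp hndK'
    obtain ⟨hOb1, hndrest⟩ := List.nodup_cons.mp hndK'
    have hane : a ≠ 1000 + a := by omega
    have hbne : b ≠ 1000 + b := by omega
    have hab : a ≠ b := fun he => ha1 (by simp [he])
    have haOb : a ≠ 1000 + b := fun he => ha1 (by simp [he])
    have hOab : (1000 + a) ≠ b := fun he => hOa1 (by simp [he])
    have hOaOb : (1000 + a) ≠ 1000 + b := fun he => hOa1 (by simp [he])
    -- step 1: the pyApp at key a
    have hnda : ((d0 ++ cb2L lower a).map Prod.fst).Nodup := by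
      have hsubA : ((d0 ++ cb2L lower a).map Prod.fst).Sublist
          (d0.map Prod.fst ++ (a :: b :: t').flatMap (fun x => [x, 1000 + x])) := by
        rw [List.map_append, List.flatMap_cons]
        exact (List.Sublist.refl _).append
          ((cb2L_fst_sub lower a).trans (List.sublist_append_left _ _))
      exact hsubA.nodup hnd
    have h1 : (pyApp (PySem.Dict.mk (d0 ++ cb2L lower a)) a b).items
        = d0 ++ (if getI lower a == 1 then [(a, [1000 + a, b]), (1000 + a, [a])] else [(a, [b])]) := by
      by_cases hl : getI lower a == 1
      · have hmem : (a, [1000 + a]) ∈ (PySem.Dict.mk (d0 ++ cb2L lower a)).items := by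
          rw [mk_items]
          unfold cb2L
          simp [hl]
        rw [items_pyApp_found _ _ _ _ hmem (by rw [mk_items]; exact hnda), mk_items]
        unfold cb2L
        simp only [hl, if_true, List.map_append]
        rw [map_update_not_mem _ _ _ haD]
        have hOa : ((1000 + a : Int) == a) = false := by simp [Ne.symm hane]
        have haa : ((a : Int) == a) = true := by simp
        simp [hOa, haa, hl]
      · have hfresh : a ∉ (PySem.Dict.mk (d0 ++ cb2L lower a)).items.map Prod.fst := by
          rw [mk_items]
          unfold cb2L
          simp [hl, haD]
        rw [items_pyApp_fresh _ _ _ hfresh, mk_items]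
        unfold cb2L
        simp [hl]
    have hblkfst : ∀ k, k ∈ ((if getI lower a == 1 then
          [(a, [1000 + a, b]), (1000 + a, [a])] else [(a, [b])]) : List (Int × List Int)).map Prod.fst →
        k = a ∨ k = 1000 + a := by
      intro k hk
      by_cases hl : getI lower a == 1 <;> simp [hl] at hk <;> tauto
    -- step 2: the cross block at b
    have h2 : (crossB lower (pyApp (PySem.Dict.mk (d0 ++ cb2L lower a)) a b) b).items
        = (d0 ++ (if getI lower a == 1 then [(a, [1000 + a, b]), (1000 + a, [a])] else [(a, [b])]))
          ++ cb2L lower b := by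
      rw [crossB_items lower _ b ?_ ?_ hbne]
      · rw [h1]
      · rw [h1]
        simp only [List.map_append, List.mem_append]
        rintro (hm | hm)
        · exact hbD hm
        · rcases hblkfst b hm with h | h
          · exact hab h.symm
          · exact hOab h.symm
      · rw [h1]
        simp only [List.map_append, List.mem_append]
        rintro (hm | hm)
        · exact hbD' hm
        · rcases hblkfst (1000 + b) hm with h | h
          · exact haOb h.symm
          · exact hOaOb h.symm
    have h3 : crossB lower (pyApp (PySem.Dict.mk (d0 ++ cb2L lower a)) a b) b
        = PySem.Dict.mk ((d0 ++ (if getI lower a == 1 then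
            [(a, [1000 + a, b]), (1000 + a, [a])] else [(a, [b])])) ++ cb2L lower b) := by
      rw [← mk_items_self (crossB lower (pyApp (PySem.Dict.mk (d0 ++ cb2L lower a)) a b) b), h2]
    simp only [List.zip_cons_cons, List.foldl_cons]
    rw [h3]
    have hblksub : ((if getI lower a == 1 then
        [(a, [1000 + a, b]), (1000 + a, [a])] else [(a, [b])]) : List (Int × List Int)).map Prod.fst
          |>.Sublist [a, 1000 + a] := by
      by_cases hl : getI lower a == 1
      · rw [if_pos hl]
        simp only [List.map_cons, List.map_nil]
        exact List.Sublist.refl _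
      · rw [if_neg hl]
        simp only [List.map_cons, List.map_nil]
        exact List.Sublist.cons₂ _ (List.nil_sublist _)
    have hnd' : (((d0 ++ (if getI lower a == 1 then
        [(a, [1000 + a, b]), (1000 + a, [a])] else [(a, [b])])).map Prod.fst)
          ++ ((b :: t').flatMap (fun x => [x, 1000 + x]))).Nodup := by
      have hsub : (((d0 ++ (if getI lower a == 1 then
          [(a, [1000 + a, b]), (1000 + a, [a])] else [(a, [b])])).map Prod.fst)
            ++ ((b :: t').flatMap (fun x => [x, 1000 + x]))).Sublist
          (d0.map Prod.fst ++ (a :: b :: t').flatMap (fun x => [x, 1000 + x])) := by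
        have hfm : ((a :: b :: t').flatMap (fun x => [x, 1000 + x]))
            = [a, 1000 + a] ++ ((b :: t').flatMap (fun x => [x, 1000 + x])) := rfl
        rw [List.map_append, List.append_assoc, hfm]
        exact (List.Sublist.refl _).append (hblksub.append (List.Sublist.refl _))
      exact hsub.nodup hnd
    have := ih b (d0 ++ (if getI lower a == 1 then
        [(a, [1000 + a, b]), (1000 + a, [a])] else [(a, [b])])) hnd'
      (fun x hx => hb x (by simp at hx ⊢; tauto))
    rw [this]
    show d0 ++ _ ++ gU lower (b :: t') = d0 ++ gU lower (a :: b :: t')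
    rw [List.append_assoc]
    rw [show gU lower (a :: b :: t')
        = (if getI lower a == 1 then [(a, [1000 + a, b]), (1000 + a, [a])] else [(a, [b])])
          ++ gU lower (b :: t') from rfl]

theorem chainFoldU_items (lower : List Int) (us : List Int)
    (hnd : (us.flatMap (fun x => [x, 1000 + x])).Nodup)
    (hb : ∀ x ∈ us, 0 ≤ x ∧ x < 1000) :
    (chainFoldU lower PySem.Dict.empty us).items = gU lower us := by
  cases us with
  | nil => rfl
  | cons u0 t =>
    show (((u0 :: t).zip t).foldl (fun d pu => crossB lower (pyApp d pu.1 pu.2) pu.2)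
        (crossB lower PySem.Dict.empty u0)).items = _
    have hi : (crossB lower PySem.Dict.empty u0).items = [] ++ cb2L lower u0 := by
      rw [crossB_items lower _ u0 (by rw [empty_items]; simp) (by rw [empty_items]; simp)
        (by omega), empty_items]
    have hc0 : crossB lower PySem.Dict.empty u0 = PySem.Dict.mk ([] ++ cb2L lower u0) := by
      rw [← mk_items_self (crossB lower PySem.Dict.empty u0), hi]
    rw [hc0, chainA_items lower t u0 [] (by simpa using hnd) hb]
    simp

-- ---------- bridges: neighbour scans vs the filtered index lists ----------

theorem filter_range_split (p : Int → Bool) (n a : Int) (P T : List Int)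
    (h : (PySem.List.pyRange 0 n 1).filter p = P ++ a :: T) :
    (PySem.List.pyRange 0 a 1).filter p = P ∧ (PySem.List.pyRange (a + 1) n 1).filter p = T := by
  have haS : a ∈ (PySem.List.pyRange 0 n 1).filter p := by rw [h]; simp
  have haR : a ∈ PySem.List.pyRange 0 n 1 := (List.mem_filter.mp haS).1
  have hpa : p a = true := (List.mem_filter.mp haS).2
  have hbound : 0 ≤ a ∧ a < n := by
    have := PySem.List.mem_pyRange_one.mp haR
    omega
  have hsplit1 : PySem.List.pyRange 0 n 1
      = PySem.List.pyRange 0 (a + 1) 1 ++ PySem.List.pyRange (a + 1) n 1 := by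
    rw [PySem.List.pyRange_one_append] <;> omega
  have hsplit2 : PySem.List.pyRange 0 (a + 1) 1 = PySem.List.pyRange 0 a 1 ++ [a] := by
    rw [PySem.List.pyRange_one_succ_right] <;> omega
  have hpairS : ((PySem.List.pyRange 0 n 1).filter p).Pairwise (· < ·) :=
    (PySem.List.pairwise_lt_pyRange_one 0 n).filter p
  rw [h, List.pairwise_append] at hpairS
  have hPa : ∀ x ∈ P, x < a := fun x hx => hpairS.2.2 x hx a (by simp)
  have hTa : ∀ y ∈ T, a < y := by
    have := hpairS.2.1
    rw [List.pairwise_cons] at this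
    exact this.1
  have heq : ((PySem.List.pyRange 0 a 1).filter p) ++ (a :: (PySem.List.pyRange (a + 1) n 1).filter p)
      = P ++ (a :: T) := by
    rw [← h, hsplit1, hsplit2]
    simp [List.filter_append, hpa]
  have hsp := split_pred (fun x => decide (x < a)) _ _ _ _ heq
    (by
      intro x hx
      have hm : x ∈ PySem.List.pyRange 0 a 1 := (List.mem_filter.mp hx).1
      have := PySem.List.mem_pyRange_one.mp hm
      simp
      omega)
    (by
      intro y hy
      simp only [List.mem_cons] at hy
      rcases hy with rfl | hy
      · simp
      · have hm : y ∈ PySem.List.pyRange (a + 1) n 1 := (List.mem_filter.mp hy).1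
        have := PySem.List.mem_pyRange_one.mp hm
        simp
        omega)
    (by intro x hx; simpa using hPa x hx)
    (by
      intro y hy
      simp only [List.mem_cons] at hy
      rcases hy with rfl | hy
      · simp
      · have := hTa y hy
        simp
        omega)
  refine ⟨hsp.1, ?_⟩
  have := hsp.2
  simpa using this

theorem nxtU_char (upper : List Int) (n a : Int) (P T : List Int)
    (h : (PySem.List.pyRange 0 n 1).filter (fun j => getI upper j == 1) = P ++ a :: T) :
    nxtU upper n a = T.head?.getD (-1) := by
  unfold nxtU
  rw [find?_eq_head?_filter, (filter_range_split _ n a P T h).2]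

theorem range_rev_eq (a : Int) :
    PySem.List.pyRange (a - 1) (-1) (-1) = (PySem.List.pyRange 0 a 1).reverse := by
  have := PySem.List.pyRange_neg_one_eq_reverse (a - 1) (-1)
  simpa using this

theorem prvL_char (lower : List Int) (m a : Int) (P T : List Int)
    (h : (PySem.List.pyRange 0 m 1).filter (fun j => getI lower j == 1) = P ++ a :: T) :
    prvL lower a = P.getLast?.getD (-1) := by
  unfold prvL
  rw [range_rev_eq, find?_eq_head?_filter, List.filter_reverse, List.head?_reverse,
    (filter_range_split _ m a P T h).1]

theorem dropLast_rev {α : Type} (l : List α) : l.reverse.dropLast = l.tail.reverse := by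
  cases l with
  | nil => rfl
  | cons x t => simp [List.reverse_cons]

-- ---------- facts about L = the lower-marked positions ----------

theorem L_nonneg (lower : List Int) (m : Int) :
    ∀ x ∈ (PySem.List.pyRange 0 m 1).filter (fun j => getI lower j == 1), 0 ≤ x := by
  intro x hx
  have hm : x ∈ PySem.List.pyRange 0 m 1 := (List.mem_filter.mp hx).1
  have := PySem.List.mem_pyRange_one.mp hm
  omega

theorem prvL_ne_of_split (lower : List Int) (m a : Int) (P T : List Int) (hP : P ≠ [])
    (h : (PySem.List.pyRange 0 m 1).filter (fun j => getI lower j == 1) = P ++ a :: T) :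
    ¬ (prvL lower a = -1) := by
  rcases P.eq_nil_or_concat with rfl | ⟨P', x, rfl⟩
  · exact absurd rfl hP
  · rw [List.concat_eq_append] at h
    rw [prvL_char lower m a (P' ++ [x]) T h, List.getLast?_concat]
    have hxm : x ∈ P' ++ [x] := by simp
    have hx0 : 0 ≤ x := L_nonneg lower m x (by rw [h]; exact List.mem_append_left _ hxm)
    simp
    omega

theorem prvL_head (lower : List Int) (m a : Int) (T : List Int)
    (h : (PySem.List.pyRange 0 m 1).filter (fun j => getI lower j == 1) = a :: T) :
    prvL lower a = -1 := by
  rw [prvL_char lower m a [] T (by simpa using h)]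
  rfl

theorem adj_rev_prvL (lower : List Int) (m : Int) :
    ∀ (P : List Int) (x y : Int) (S : List Int),
      ((PySem.List.pyRange 0 m 1).filter (fun j => getI lower j == 1)).reverse = P ++ x :: y :: S →
      prvL lower x = y := by
  intro P x y S h
  have h0 := congrArg List.reverse h
  rw [List.reverse_reverse] at h0
  have h1 : (P ++ x :: y :: S).reverse = (S.reverse ++ [y]) ++ x :: P.reverse := by
    simp
  rw [h1] at h0
  rw [prvL_char lower m x (S.reverse ++ [y]) P.reverse h0, List.getLast?_concat]
  rfl

theorem zip_Lr (lower : List Int) (m : Int) :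
    (((PySem.List.pyRange 0 m 1).filter (fun j => getI lower j == 1)).reverse.zip
        ((PySem.List.pyRange 0 m 1).filter (fun j => getI lower j == 1)).reverse.tail)
      = (((PySem.List.pyRange 0 m 1).filter (fun j => getI lower j == 1)).reverse.dropLast).map
          (fun b => (b, prvL lower b)) :=
  zip_tail_of_adj (prvL lower) _ (adj_rev_prvL lower m)

theorem mem_dropLast_rev_iff (lower : List Int) (m a : Int)
    (ha : a ∈ (PySem.List.pyRange 0 m 1).filter (fun j => getI lower j == 1)) :
    (a ∈ ((PySem.List.pyRange 0 m 1).filter (fun j => getI lower j == 1)).reverse.dropLast)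
      ↔ ¬ (prvL lower a = -1) := by
  have hnd : ((PySem.List.pyRange 0 m 1).filter (fun j => getI lower j == 1)).Nodup :=
    (PySem.List.nodup_pyRange_one 0 m).filter _
  obtain ⟨P, T, hPT⟩ := List.append_of_mem ha
  rw [dropLast_rev, List.mem_reverse]
  constructor
  · intro hmem
    cases P with
    | nil =>
      exfalso
      rw [hPT, List.nil_append] at hmem hnd
      rw [List.nodup_cons] at hnd
      exact hnd.1 (by simpa using hmem)
    | cons p0 P' =>
      exact prvL_ne_of_split lower m a (p0 :: P') T (by simp) hPT
  · intro hne
    cases P with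
    | nil =>
      exact absurd (prvL_head lower m a T (by simpa using hPT)) hne
    | cons p0 P' =>
      rw [hPT]
      simp

theorem filter_prv_rev (lower : List Int) (m : Int) :
    (((PySem.List.pyRange 0 m 1).filter (fun j => getI lower j == 1)).reverse.filter
        (fun i => !(prvL lower i == -1)))
      = ((PySem.List.pyRange 0 m 1).filter (fun j => getI lower j == 1)).reverse.dropLast := by
  rw [List.filter_reverse, dropLast_rev]
  cases hL : (PySem.List.pyRange 0 m 1).filter (fun j => getI lower j == 1) with
  | nil => rfl
  | cons h0 t =>
    have hh : prvL lower h0 = -1 := prvL_head lower m h0 t hL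
    have ht : ∀ x ∈ t, (!(prvL lower x == -1)) = true := by
      intro x hx
      obtain ⟨P', T', hPT'⟩ := List.append_of_mem hx
      have hne : ¬ (prvL lower x = -1) :=
        prvL_ne_of_split lower m x (h0 :: P') T' (by simp) (by rw [hL, hPT']; rfl)
      simpa using hne
    show ((h0 :: t).filter (fun i => !(prvL lower i == -1))).reverse = (h0 :: t).tail.reverse
    rw [List.filter_cons, if_neg (by simp [hh]), List.filter_eq_self.mpr ht]
    rfl

-- ---------- the per-position closed-form block of B ----------

def blockF (upper lower : List Int) (n a : Int) : List (Int × List Int) :=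
  (if (getI lower a == 1) || !(nxtU upper n a == -1) then
      [(a, (if getI lower a == 1 then [1000 + a] else [])
            ++ (if nxtU upper n a == -1 then [] else [nxtU upper n a]))]
    else [])
  ++ (if getI lower a == 1 then
      [(1000 + a, [a] ++ (if prvL lower a == -1 then [] else [1000 + prvL lower a]))]
    else [])

theorem stepB1_eq_fold (upper lower : List Int) (n : Int) (d : PySem.Dict Int (List Int)) (i : Int) :
    stepB1 upper lower n d i
      = if getI upper i == 1 then
          (blockF upper lower n i).foldl (fun d p => d.insert p.1 p.2) d
        else d := by
  unfold stepB1 blockF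
  by_cases hu : getI upper i == 1
  · by_cases hl : getI lower i == 1 <;> by_cases hnu : nxtU upper n i == -1 <;>
      simp [hu, hl, hnu]
  · simp [hu]

def esB (lower : List Int) (i : Int) : List (Int × List Int) :=
  if !(prvL lower i == -1) then [(1000 + i, [1000 + prvL lower i])] else []

theorem stepB2_eq_fold (upper lower : List Int) (d : PySem.Dict Int (List Int)) (i : Int) :
    stepB2 upper lower d i
      = if getI lower i == 1 && !(getI upper i == 1) then
          (esB lower i).foldl (fun d p => d.insert p.1 p.2) d
        else d := by
  unfold stepB2 esB
  by_cases hc : getI lower i == 1 && !(getI upper i == 1)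
  · by_cases hp : prvL lower i == -1 <;> simp [hc, hp]
  · simp [hc]

-- ---------- key inventories ----------

theorem flatMap2_nodup :
    ∀ S : List Int, S.Nodup → (∀ x ∈ S, 0 ≤ x ∧ x < 1000) →
      (S.flatMap (fun a => [a, 1000 + a])).Nodup := by
  intro S
  induction S with
  | nil => intro _ _; simp
  | cons x t ih =>
    intro hnd hb
    rw [List.nodup_cons] at hnd
    have hx := hb x (by simp)
    simp only [List.flatMap_cons, List.cons_append, List.nil_append]
    rw [List.nodup_cons, List.nodup_cons]
    refine ⟨?_, ?_, ih hnd.2 (fun y hy => hb y (by simp [hy]))⟩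
    · simp only [List.mem_cons, List.mem_flatMap]
      rintro (he | ⟨y, hy, hk⟩)
      · omega
      · have hyb := hb y (by simp [hy])
        simp only [List.mem_cons, List.not_mem_nil, or_false] at hk
        rcases hk with he | he
        · exact hnd.1 (he ▸ hy)
        · omega
    · simp only [List.mem_flatMap]
      rintro ⟨y, hy, hk⟩
      have hyb := hb y (by simp [hy])
      simp only [List.mem_cons, List.not_mem_nil, or_false] at hk
      rcases hk with he | he
      · omega
      · have hxy : x = y := by omega
        exact hnd.1 (hxy ▸ hy)

theorem flatMap_sublist {α β : Type} (f g : α → List β) (h : ∀ a, (f a).Sublist (g a)) :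
    ∀ l : List α, (l.flatMap f).Sublist (l.flatMap g) := by
  intro l
  induction l with
  | nil => simp
  | cons x t ih => simpa [List.flatMap_cons] using (h x).append ih

theorem blockF_keys_sub (upper lower : List Int) (n a : Int) :
    ((blockF upper lower n a).map Prod.fst).Sublist [a, 1000 + a] := by
  unfold blockF
  by_cases hl : getI lower a == 1
  · have hcond : ((getI lower a == 1) || !(nxtU upper n a == -1)) = true := by simp [hl]
    simp only [hl, hcond, if_true, List.map_append, List.map_cons, List.map_nil,
      List.cons_append, List.nil_append]
    exact List.Sublist.refl _
  · have hl' : ((getI lower a == 1) : Bool) = false := by simpa using hl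
    rw [hl']
    by_cases hnu : nxtU upper n a == -1
    · simp only [hnu, Bool.not_true, Bool.or_false, Bool.false_eq_true, if_false,
        List.nil_append, List.map_nil]
      exact List.nil_sublist _
    · have hnu' : (nxtU upper n a == -1) = false := by simpa using hnu
      simp only [hnu', Bool.not_false, Bool.or_true, if_true, Bool.false_eq_true, if_false,
        List.append_nil, List.map_cons, List.map_nil]
      exact List.Sublist.cons₂ _ (List.nil_sublist _)

theorem esB_keys_sub (lower : List Int) (i : Int) :
    ((esB lower i).map Prod.fst).Sublist [1000 + i] := by
  unfold esB
  by_cases hp : prvL lower i == -1 <;> simp [hp]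

theorem flatMap_single {α β : Type} (g : α → β) :
    ∀ l : List α, l.flatMap (fun a => [g a]) = l.map g := by
  intro l
  induction l with
  | nil => rfl
  | cons x t ih => simp [List.flatMap_cons, ih]

theorem mapfst_flatMap {α : Type} (f : α → List (Int × List Int)) (l : List α) :
    ((l.flatMap f).map Prod.fst) = l.flatMap (fun x => (f x).map Prod.fst) := by
  induction l with
  | nil => rfl
  | cons x t ih => simp [List.flatMap_cons, ih]

theorem mem_keysF_1000 (upper lower : List Int) (n : Int) (U : List Int)
    (hUb : ∀ x ∈ U, 0 ≤ x ∧ x < 1000) (a : Int) (ha : 0 ≤ a) :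
    ((1000 + a) ∈ (U.flatMap (blockF upper lower n)).map Prod.fst)
      ↔ (a ∈ U ∧ (getI lower a == 1) = true) := by
  rw [mapfst_flatMap]
  constructor
  · intro hm
    rw [List.mem_flatMap] at hm
    obtain ⟨x, hx, hk⟩ := hm
    have hxb := hUb x hx
    have hmem : (1000 + a) ∈ [x, 1000 + x] := (blockF_keys_sub upper lower n x).subset hk
    simp only [List.mem_cons, List.not_mem_nil, or_false] at hmem
    rcases hmem with he | he
    · omega
    · have hax : a = x := by omega
      subst hax
      by_cases hla : getI lower a == 1
      · exact ⟨hx, hla⟩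
      · exfalso
        unfold blockF at hk
        by_cases hnu : nxtU upper n a == -1
        · simp [hla, hnu] at hk
        · simp [hla, hnu] at hk
  · rintro ⟨haU, hla⟩
    rw [List.mem_flatMap]
    refine ⟨a, haU, ?_⟩
    unfold blockF
    simp [hla]

-- ---------- the forward items, rewritten per position ----------

theorem main_fwd_eq (upper lower : List Int) (n : Int) (es : List (Int × Int))
    (hsmall : ∀ q ∈ es, 1000 ≤ q.1)
    (hat : ∀ a : Int, a ∈ (PySem.List.pyRange 0 n 1).filter (fun j => getI lower j == 1) →
      es.filter (fun p => p.1 == 1000 + a)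
        = if prvL lower a == -1 then [] else [(1000 + a, 1000 + prvL lower a)]) :
    ∀ (T P : List Int),
      (PySem.List.pyRange 0 n 1).filter (fun j => getI upper j == 1) = P ++ T →
      (∀ x ∈ T, 0 ≤ x ∧ x < 1000) →
      (gU lower T).map
          (fun q => (q.1, q.2 ++ ((es.filter (fun p => p.1 == q.1)).map Prod.snd)))
        = T.flatMap (blockF upper lower n) := by
  intro T
  induction T with
  | nil => intro _ _ _; rfl
  | cons a T' ih =>
    intro P hsplit hb
    have hab := hb a (by simp)
    have haU : a ∈ (PySem.List.pyRange 0 n 1).filter (fun j => getI upper j == 1) := by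
      rw [hsplit]; simp
    have haR : a ∈ PySem.List.pyRange 0 n 1 := (List.mem_filter.mp haU).1
    have hfa : es.filter (fun p => p.1 == a) = [] := by
      rw [List.filter_eq_nil_iff]
      intro q hq
      have := hsmall q hq
      simp only [beq_iff_eq]
      omega
    cases T' with
    | nil =>
      have hnx : nxtU upper n a = -1 := by
        rw [nxtU_char upper n a P [] hsplit]; rfl
      by_cases hla : getI lower a == 1
      · have h1 := hat a (List.mem_filter.mpr ⟨haR, hla⟩)
        by_cases hp : prvL lower a == -1 <;>
          simp [gU, cb2L, blockF, hla, hnx, hfa, h1, hp]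
      · have hla' : ¬ getI lower a = 1 := by simpa using hla
        simp [gU, cb2L, blockF, hla', hnx]
    | cons b T'' =>
      have hnx : nxtU upper n a = b := by
        rw [nxtU_char upper n a P (b :: T'') hsplit]; rfl
      have hbb := hb b (by simp)
      have hbne : (b == (-1 : Int)) = false := by
        simp only [beq_eq_false_iff_ne, ne_eq]
        omega
      have hsplit' : (PySem.List.pyRange 0 n 1).filter (fun j => getI upper j == 1)
          = (P ++ [a]) ++ (b :: T'') := by
        simpa [List.append_assoc] using hsplit
      have ihh := ih (P ++ [a]) hsplit' (fun x hx => hb x (by simp [hx]))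
      have hgu : gU lower (a :: b :: T'')
          = (if getI lower a == 1 then [(a, [1000 + a, b]), (1000 + a, [a])] else [(a, [b])])
            ++ gU lower (b :: T'') := rfl
      rw [hgu, List.map_append, ihh, List.flatMap_cons]
      congr 1
      by_cases hla : getI lower a == 1
      · have h1 := hat a (List.mem_filter.mpr ⟨haR, hla⟩)
        by_cases hp : prvL lower a == -1 <;>
          simp [blockF, hla, hnx, hbne, hfa, h1, hp]
      · have hla' : ¬ getI lower a = 1 := by simpa using hla
        simp [blockF, hla', hnx, hbne, hfa]

-- ---------- the B side, flattened ----------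

theorem B_items (upper lower : List Int) (hcap : (upper.length : Int) ≤ 1000) :
    to_graph_alt upper lower
      = (((PySem.List.pyRange 0 (upper.length : Int) 1).filter (fun j => getI upper j == 1)).flatMap
            (blockF upper lower (upper.length : Int)))
        ++ ((((PySem.List.pyRange 0 (upper.length : Int) 1).reverse.filter
                (fun i => getI lower i == 1 && !(getI upper i == 1))).filter
              (fun i => !(prvL lower i == -1))).map
            (fun i => (1000 + i, [1000 + prvL lower i]))) := by
  unfold to_graph_alt
  dsimp only
  rw [foldl_filter_of_step (fun j => getI upper j == 1) _ _ (stepB1_eq_fold upper lower _)]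
  rw [show PySem.List.pyRange ((upper.length : Int) - 1) (-1) (-1)
      = (PySem.List.pyRange 0 (upper.length : Int) 1).reverse from range_rev_eq _]
  rw [foldl_filter_of_step (fun i => getI lower i == 1 && !(getI upper i == 1)) _ _
    (stepB2_eq_fold upper lower)]
  have hRnd : (PySem.List.pyRange 0 (upper.length : Int) 1).Nodup :=
    PySem.List.nodup_pyRange_one 0 _
  have hUb : ∀ x ∈ (PySem.List.pyRange 0 (upper.length : Int) 1).filter
      (fun j => getI upper j == 1), 0 ≤ x ∧ x < 1000 := by
    intro x hx
    have hm : x ∈ PySem.List.pyRange 0 (upper.length : Int) 1 := (List.mem_filter.mp hx).1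
    have := PySem.List.mem_pyRange_one.mp hm
    omega
  have hWb : ∀ x ∈ (PySem.List.pyRange 0 (upper.length : Int) 1).reverse.filter
      (fun i => getI lower i == 1 && !(getI upper i == 1)), 0 ≤ x ∧ x < 1000 := by
    intro x hx
    have hm : x ∈ (PySem.List.pyRange 0 (upper.length : Int) 1).reverse := (List.mem_filter.mp hx).1
    rw [List.mem_reverse] at hm
    have := PySem.List.mem_pyRange_one.mp hm
    omega
  have hWU : ∀ x ∈ (PySem.List.pyRange 0 (upper.length : Int) 1).reverse.filter
      (fun i => getI lower i == 1 && !(getI upper i == 1)), ¬ (getI upper x == 1) = true := by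
    intro x hx
    have := (List.mem_filter.mp hx).2
    simp only [Bool.and_eq_true, Bool.not_eq_true'] at this
    simp [this.2]
  have hWsingle : ((PySem.List.pyRange 0 (upper.length : Int) 1).reverse.filter
      (fun i => getI lower i == 1 && !(getI upper i == 1))).flatMap (fun i => ([1000 + i] : List Int))
        = ((PySem.List.pyRange 0 (upper.length : Int) 1).reverse.filter
      (fun i => getI lower i == 1 && !(getI upper i == 1))).map (fun i => 1000 + i) :=
    flatMap_single _ _
  have hkeys : ((((PySem.List.pyRange 0 (upper.length : Int) 1).filter
        (fun j => getI upper j == 1)).flatMap (fun x => (blockF upper lower (upper.length : Int) x).map Prod.fst))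
      ++ (((PySem.List.pyRange 0 (upper.length : Int) 1).reverse.filter
        (fun i => getI lower i == 1 && !(getI upper i == 1))).flatMap
          (fun i => (esB lower i).map Prod.fst))).Nodup := by
    have hsub : ((((PySem.List.pyRange 0 (upper.length : Int) 1).filter
          (fun j => getI upper j == 1)).flatMap (fun x => (blockF upper lower (upper.length : Int) x).map Prod.fst))
        ++ (((PySem.List.pyRange 0 (upper.length : Int) 1).reverse.filter
          (fun i => getI lower i == 1 && !(getI upper i == 1))).flatMap
            (fun i => (esB lower i).map Prod.fst))).Sublist
        ((((PySem.List.pyRange 0 (upper.length : Int) 1).filter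
          (fun j => getI upper j == 1)).flatMap (fun a => [a, 1000 + a]))
        ++ (((PySem.List.pyRange 0 (upper.length : Int) 1).reverse.filter
          (fun i => getI lower i == 1 && !(getI upper i == 1))).map (fun i => 1000 + i))) := by
      refine List.Sublist.append
        (flatMap_sublist _ _ (blockF_keys_sub upper lower (upper.length : Int)) _) ?_
      rw [← hWsingle]
      exact flatMap_sublist _ _ (esB_keys_sub lower) _
    refine hsub.nodup ?_
    rw [List.nodup_append]
    refine ⟨flatMap2_nodup _ (hRnd.filter _) hUb, ?_, ?_⟩
    · refine List.Nodup.map ?_ ((List.nodup_reverse.mpr hRnd).filter _)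
      intro x y hxy
      simpa using hxy
    · intro k hk b hbm
      rw [List.mem_flatMap] at hk
      obtain ⟨x, hx, hkx⟩ := hk
      have hxb := hUb x hx
      obtain ⟨i, hi, rfl⟩ := List.mem_map.mp hbm
      have hib := hWb i hi
      simp only [List.mem_cons, List.not_mem_nil, or_false] at hkx
      rcases hkx with he | he
      · omega
      · subst he
        intro hee
        have hix : i = x := by omega
        subst hix
        exact hWU i hi (List.mem_filter.mp hx).2
  have h1 : ((((PySem.List.pyRange 0 (upper.length : Int) 1).filter (fun j => getI upper j == 1)).foldl
      (fun d x => (blockF upper lower (upper.length : Int) x).foldl (fun d p => d.insert p.1 p.2) d)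
      PySem.Dict.empty)).items
        = ((PySem.List.pyRange 0 (upper.length : Int) 1).filter (fun j => getI upper j == 1)).flatMap
            (blockF upper lower (upper.length : Int)) := by
    have := items_foldl_inserts (blockF upper lower (upper.length : Int)) _ PySem.Dict.empty
      (by
        rw [empty_items]
        simp only [List.map_nil, List.nil_append]
        exact ((List.sublist_append_left _ _).nodup hkeys))
    rw [empty_items] at this
    simpa using this
  have hd1 : (((PySem.List.pyRange 0 (upper.length : Int) 1).filter (fun j => getI upper j == 1)).foldl
      (fun d x => (blockF upper lower (upper.length : Int) x).foldl (fun d p => d.insert p.1 p.2) d)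
      PySem.Dict.empty)
        = PySem.Dict.mk (((PySem.List.pyRange 0 (upper.length : Int) 1).filter
            (fun j => getI upper j == 1)).flatMap (blockF upper lower (upper.length : Int))) := by
    rw [← h1, mk_items_self]
  rw [hd1]
  have h2 := items_foldl_inserts (esB lower)
    ((PySem.List.pyRange 0 (upper.length : Int) 1).reverse.filter
      (fun i => getI lower i == 1 && !(getI upper i == 1)))
    (PySem.Dict.mk (((PySem.List.pyRange 0 (upper.length : Int) 1).filter
      (fun j => getI upper j == 1)).flatMap (blockF upper lower (upper.length : Int))))
    (by
      rw [mk_items, mapfst_flatMap]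
      exact hkeys)
  rw [h2, mk_items]
  congr 1
  have : ((PySem.List.pyRange 0 (upper.length : Int) 1).reverse.filter
      (fun i => getI lower i == 1 && !(getI upper i == 1))).flatMap (esB lower)
      = (((PySem.List.pyRange 0 (upper.length : Int) 1).reverse.filter
          (fun i => getI lower i == 1 && !(getI upper i == 1))).filter
            (fun i => !(prvL lower i == -1))).map (fun i => (1000 + i, [1000 + prvL lower i])) := by
    rw [← flatMap_if_singleton (fun i => !(prvL lower i == -1))
      (fun i => ((1000 + i : Int), [1000 + prvL lower i]))]
    rfl
  rw [this]

-- ===== VERDICT (by name: the statement is the Claim_ definition above) =====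
theorem to_graph_spec : Claim_equal_to_graph := by
  intro upper lower _ hpre
  obtain ⟨hlen, hcapN⟩ := hpre
  have hcap : (upper.length : Int) ≤ 1000 := by exact_mod_cast hcapN
  show to_graph upper lower = to_graph_alt upper lower
  rw [B_items upper lower hcap]
  unfold to_graph
  dsimp only
  rw [foldl_filter_of_step (fun i => getI upper i == 1) (stepA1 upper lower) (stepU lower)
        (stepA1_eq upper lower)]
  rw [show PySem.List.pyRange ((upper.length : Int) - 1) (-1) (-1)
      = (PySem.List.pyRange 0 (upper.length : Int) 1).reverse from range_rev_eq _]
  rw [foldl_filter_of_step (fun i => getI lower i == 1) (stepA2 lower) stepV (stepA2_eq lower)]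
  rw [List.filter_reverse]
  rw [foldV_none, foldU_none]
  -- shared facts
  have hRnd : (PySem.List.pyRange 0 (upper.length : Int) 1).Nodup :=
    PySem.List.nodup_pyRange_one 0 _
  have hUnd : ((PySem.List.pyRange 0 (upper.length : Int) 1).filter
      (fun j => getI upper j == 1)).Nodup := hRnd.filter _
  have hLnd : ((PySem.List.pyRange 0 (upper.length : Int) 1).filter
      (fun j => getI lower j == 1)).Nodup := hRnd.filter _
  have hDnd : (((PySem.List.pyRange 0 (upper.length : Int) 1).filter
      (fun j => getI lower j == 1)).reverse.dropLast).Nodup :=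
    (List.dropLast_sublist _).nodup (List.nodup_reverse.mpr hLnd)
  have hUb : ∀ x ∈ (PySem.List.pyRange 0 (upper.length : Int) 1).filter
      (fun j => getI upper j == 1), 0 ≤ x ∧ x < 1000 := by
    intro x hx
    have hm : x ∈ PySem.List.pyRange 0 (upper.length : Int) 1 := (List.mem_filter.mp hx).1
    have := PySem.List.mem_pyRange_one.mp hm
    omega
  have hDL : ∀ a ∈ ((PySem.List.pyRange 0 (upper.length : Int) 1).filter
      (fun j => getI lower j == 1)).reverse.dropLast,
      a ∈ (PySem.List.pyRange 0 (upper.length : Int) 1).filter (fun j => getI lower j == 1) := by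
    intro a ha
    exact List.mem_reverse.mp ((List.dropLast_sublist _).subset ha)
  -- the forward dict
  have hfwdD : chainFoldU lower PySem.Dict.empty
      ((PySem.List.pyRange 0 (upper.length : Int) 1).filter (fun j => getI upper j == 1))
      = PySem.Dict.mk (gU lower ((PySem.List.pyRange 0 (upper.length : Int) 1).filter
          (fun j => getI upper j == 1))) := by
    refine PySem.Dict.ext ?_
    rw [mk_items]
    exact chainFoldU_items lower _ (flatMap2_nodup _ hUnd hUb) hUb
  rw [hfwdD]
  -- the backward fold as an event fold over (key, appended value) pairs
  rw [zip_Lr lower (upper.length : Int)]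
  have hfold_eq :
      ((((PySem.List.pyRange 0 (upper.length : Int) 1).filter (fun j => getI lower j == 1)).reverse.dropLast).map
          (fun b => (b, prvL lower b))).foldl
        (fun d ab => pyApp d (1000 + ab.1) (1000 + ab.2))
        (PySem.Dict.mk (gU lower ((PySem.List.pyRange 0 (upper.length : Int) 1).filter (fun j => getI upper j == 1))))
      = ((((PySem.List.pyRange 0 (upper.length : Int) 1).filter (fun j => getI lower j == 1)).reverse.dropLast).map
          (fun a => ((1000 + a : Int), 1000 + prvL lower a))).foldl
        (fun d p => pyApp d p.1 p.2)
        (PySem.Dict.mk (gU lower ((PySem.List.pyRange 0 (upper.length : Int) 1).filter (fun j => getI upper j == 1)))) := by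
    rw [List.foldl_map, List.foldl_map]
  rw [hfold_eq]
  -- side conditions for the event-fold lemma
  have hsmall : ∀ q ∈ (((PySem.List.pyRange 0 (upper.length : Int) 1).filter
      (fun j => getI lower j == 1)).reverse.dropLast).map
        (fun a => ((1000 + a : Int), 1000 + prvL lower a)), 1000 ≤ q.1 := by
    intro q hq
    obtain ⟨a, ha, rfl⟩ := List.mem_map.mp hq
    have := L_nonneg lower (upper.length : Int) a (hDL a ha)
    simp
    omega
  have hat : ∀ a : Int, a ∈ (PySem.List.pyRange 0 (upper.length : Int) 1).filter
      (fun j => getI lower j == 1) →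
      ((((PySem.List.pyRange 0 (upper.length : Int) 1).filter
        (fun j => getI lower j == 1)).reverse.dropLast).map
          (fun a => ((1000 + a : Int), 1000 + prvL lower a))).filter (fun p => p.1 == 1000 + a)
        = if prvL lower a == -1 then [] else [(1000 + a, 1000 + prvL lower a)] := by
    intro a haL
    rw [List.filter_map]
    have hcong : ∀ x ∈ (((PySem.List.pyRange 0 (upper.length : Int) 1).filter
        (fun j => getI lower j == 1)).reverse.dropLast),
        (((fun p : Int × Int => p.1 == 1000 + a) ∘ (fun a => ((1000 + a : Int), 1000 + prvL lower a))) x)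
          = (x == a) := by
      intro x _
      show ((1000 + x : Int) == 1000 + a) = (x == a)
      by_cases hxa : x = a
      · simp [hxa]
      · have h1 : ¬ ((1000 + x : Int) = 1000 + a) := by omega
        simp [hxa, h1]
    rw [List.filter_congr hcong, filter_beq_of_nodup a _ hDnd]
    by_cases hmem : a ∈ (((PySem.List.pyRange 0 (upper.length : Int) 1).filter
        (fun j => getI lower j == 1)).reverse.dropLast)
    · have hne := (mem_dropLast_rev_iff lower _ a haL).mp hmem
      rw [if_pos hmem, if_neg (by simp [hne])]
      rfl
    · have hpe : prvL lower a = -1 := by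
        by_contra hne
        exact hmem ((mem_dropLast_rev_iff lower _ a haL).mpr hne)
      rw [if_neg hmem, if_pos (by simp [hpe])]
      rfl
  have hmain := main_fwd_eq upper lower (upper.length : Int) _ hsmall hat
      ((PySem.List.pyRange 0 (upper.length : Int) 1).filter (fun j => getI upper j == 1)) []
      (by simp) hUb
  have hfsteq : (gU lower ((PySem.List.pyRange 0 (upper.length : Int) 1).filter
      (fun j => getI upper j == 1))).map Prod.fst
      = (((PySem.List.pyRange 0 (upper.length : Int) 1).filter
          (fun j => getI upper j == 1)).flatMap (blockF upper lower (upper.length : Int))).map Prod.fst := by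
    have h0 := congrArg (List.map Prod.fst) hmain
    rw [List.map_map] at h0
    rw [← h0]
    exact (List.map_congr_left fun q _ => rfl)
  have hkeysFnd : ((((PySem.List.pyRange 0 (upper.length : Int) 1).filter
      (fun j => getI upper j == 1)).flatMap (blockF upper lower (upper.length : Int))).map Prod.fst).Nodup := by
    rw [mapfst_flatMap]
    exact (flatMap_sublist _ _ (blockF_keys_sub upper lower (upper.length : Int)) _).nodup
      (flatMap2_nodup _ hUnd hUb)
  have h1nd : ((PySem.Dict.mk (gU lower ((PySem.List.pyRange 0 (upper.length : Int) 1).filter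
      (fun j => getI upper j == 1)))).items.map Prod.fst).Nodup := by
    rw [mk_items, hfsteq]
    exact hkeysFnd
  have h2nd : (((((PySem.List.pyRange 0 (upper.length : Int) 1).filter
      (fun j => getI lower j == 1)).reverse.dropLast).map
        (fun a => ((1000 + a : Int), 1000 + prvL lower a))).map Prod.fst).Nodup := by
    rw [List.map_map]
    refine List.Nodup.map ?_ hDnd
    intro x y hxy
    have hxy' : (1000 + x : Int) = 1000 + y := hxy
    omega
  rw [foldl_pyApp_items _ _ h1nd h2nd]
  rw [mk_items]
  rw [hmain]
  congr 1
  -- the tails: keys unseen in the forward pass, in backward order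
  rw [List.filter_map, List.map_map]
  have hWeq : (((PySem.List.pyRange 0 (upper.length : Int) 1).reverse.filter
      (fun i => getI lower i == 1 && !(getI upper i == 1))).filter
        (fun i => !(prvL lower i == -1)))
      = (((PySem.List.pyRange 0 (upper.length : Int) 1).filter
          (fun j => getI lower j == 1)).reverse.dropLast).filter (fun a => !(getI upper a == 1)) := by
    have s1 : (PySem.List.pyRange 0 (upper.length : Int) 1).reverse.filter
        (fun i => getI lower i == 1 && !(getI upper i == 1))
        = (((PySem.List.pyRange 0 (upper.length : Int) 1).filter
            (fun j => getI lower j == 1)).reverse).filter (fun i => !(getI upper i == 1)) := by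
      rw [filter_and (fun i => getI lower i == 1) (fun i => !(getI upper i == 1)),
        List.filter_reverse]
    rw [s1]
    have s2 : ((((PySem.List.pyRange 0 (upper.length : Int) 1).filter
          (fun j => getI lower j == 1)).reverse).filter (fun i => !(getI upper i == 1))).filter
            (fun i => !(prvL lower i == -1))
        = ((((PySem.List.pyRange 0 (upper.length : Int) 1).filter
            (fun j => getI lower j == 1)).reverse).filter (fun i => !(prvL lower i == -1))).filter
              (fun i => !(getI upper i == 1)) := by
      rw [← filter_and, ← filter_and]
      exact List.filter_congr (fun x _ => by rw [Bool.and_comm])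
    rw [s2, filter_prv_rev lower (upper.length : Int)]
  rw [hWeq]
  have hpredc : ∀ a ∈ (((PySem.List.pyRange 0 (upper.length : Int) 1).filter
      (fun j => getI lower j == 1)).reverse.dropLast),
      (((fun p : Int × Int => !((PySem.Dict.mk (gU lower ((PySem.List.pyRange 0 (upper.length : Int) 1).filter
          (fun j => getI upper j == 1)))).contains p.1))
        ∘ (fun a => ((1000 + a : Int), 1000 + prvL lower a))) a)
        = (!(getI upper a == 1)) := by
    intro a haD
    have haL := hDL a haD
    have ha0 : 0 ≤ a := L_nonneg lower _ a haL
    have hla : (getI lower a == 1) = true := (List.mem_filter.mp haL).2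
    have haR : a ∈ PySem.List.pyRange 0 (upper.length : Int) 1 := (List.mem_filter.mp haL).1
    show (!((PySem.Dict.mk (gU lower ((PySem.List.pyRange 0 (upper.length : Int) 1).filter
        (fun j => getI upper j == 1)))).contains (1000 + a))) = !(getI upper a == 1)
    have hcon : (PySem.Dict.mk (gU lower ((PySem.List.pyRange 0 (upper.length : Int) 1).filter
        (fun j => getI upper j == 1)))).contains (1000 + a)
        = decide ((1000 + a) ∈ (gU lower ((PySem.List.pyRange 0 (upper.length : Int) 1).filter
            (fun j => getI upper j == 1))).map Prod.fst) := by
      rw [PySem.Dict.contains_eq_decide_mem_keys, keys_eq_map_fst, mk_items]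
    rw [hcon, hfsteq]
    by_cases hu : (getI upper a == 1) = true
    · have haU : a ∈ (PySem.List.pyRange 0 (upper.length : Int) 1).filter
          (fun j => getI upper j == 1) := List.mem_filter.mpr ⟨haR, hu⟩
      have hmm := (mem_keysF_1000 upper lower (upper.length : Int) _ hUb a ha0).mpr ⟨haU, hla⟩
      simp [hmm, hu]
    · have hmm : (1000 + a) ∉ (((PySem.List.pyRange 0 (upper.length : Int) 1).filter
          (fun j => getI upper j == 1)).flatMap (blockF upper lower (upper.length : Int))).map Prod.fst := by
        intro hm
        exact hu (List.mem_filter.mp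
          ((mem_keysF_1000 upper lower (upper.length : Int) _ hUb a ha0).mp hm).1).2
      simp [hmm, hu]
  rw [List.filter_congr hpredc]
  exact List.map_congr_left (fun a _ => rfl)
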